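-- pv_equiv track=rewrite | github.com/drsuneamer/TIL | SSAFY_2022/aps/0329/5203.py | win2
-- ===== SOURCE A (Python) =====
-- def win2(lst):
--     for i in range(len(lst)):
--         if lst[i] >= 3:
--             return 2
--     for i in range(len(lst)-2):
--         if lst[i] >= 1 and lst[i+1] >= 1 and lst[i+2] >= 1:
--             return 2
--     return 0
-- ===== SOURCE B (Python) =====
-- def win2(lst):
--     # One fused pass: a run counter of consecutive elements >= 1;
--     # an element >= 3 wins immediately, a run of 3 wins too.
--     run = 0
--     for x in lst:
--         if x >= 3:
--             return 2
--         if x >= 1: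
--             run += 1
--             if run == 3:
--                 return 2
--         else:
--             run = 0
--     return 0
-- ===== Notes on version B (the rewrite author's own statement) =====
-- stated objective: simpler
-- what changed: A's two separate index scans (one for any element >= 3, one for three consecutive elements >= 1) are fused into a single structural pass over the list maintaining a run counter of consecutive elements >= 1.
import Mathlib
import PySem

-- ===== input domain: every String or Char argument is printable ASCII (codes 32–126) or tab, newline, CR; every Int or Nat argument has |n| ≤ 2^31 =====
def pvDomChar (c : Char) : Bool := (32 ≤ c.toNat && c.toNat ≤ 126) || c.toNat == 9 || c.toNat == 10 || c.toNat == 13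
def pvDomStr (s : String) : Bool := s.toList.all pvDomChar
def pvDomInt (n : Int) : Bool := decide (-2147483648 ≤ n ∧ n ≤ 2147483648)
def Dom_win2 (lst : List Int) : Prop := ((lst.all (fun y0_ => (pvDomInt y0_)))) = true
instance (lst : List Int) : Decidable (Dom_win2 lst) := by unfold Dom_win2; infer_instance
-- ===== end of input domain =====

-- B fuses A's two separate index scans into one structural pass with a run counter (simpler decomposition, same return value).

-- ===== PORT A =====
-- first loop: for i in range(len(lst)): if lst[i] >= 3: return 2
def win2Loop1 (lst : List Int) : List Int → Bool
  | [] => false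
  | i :: rest =>
    if 3 ≤ PySem.List.pyGetD lst i 0 then true else win2Loop1 lst rest

-- second loop: for i in range(len(lst)-2): if lst[i]>=1 and lst[i+1]>=1 and lst[i+2]>=1: return 2
def win2Loop2 (lst : List Int) : List Int → Bool
  | [] => false
  | i :: rest =>
    if 1 ≤ PySem.List.pyGetD lst i 0 ∧ 1 ≤ PySem.List.pyGetD lst (i + 1) 0 ∧
        1 ≤ PySem.List.pyGetD lst (i + 2) 0 then true
    else win2Loop2 lst rest

def win2 (lst : List Int) : Int :=
  if win2Loop1 lst (PySem.List.pyRange 0 (lst.length : Int) 1) then 2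
  else if win2Loop2 lst (PySem.List.pyRange 0 ((lst.length : Int) - 2) 1) then 2
  else 0

-- ===== PORT B =====
-- B's single loop; the early 'return 2' ends the recursion
def win2Go : List Int → Int → Int
  | [], _ => 0
  | x :: xs, run =>
    if 3 ≤ x then 2
    else if 1 ≤ x then
      if run + 1 = 3 then 2 else win2Go xs (run + 1)
    else win2Go xs 0

def win2_alt (lst : List Int) : Int := win2Go lst 0

-- ===== PRECONDITION & SPEC =====
def Spec_win2 (lst : List Int) (out : Int) : Prop := out = win2_alt lst
instance (lst : List Int) (out : Int) : Decidable (Spec_win2 lst out) := by unfold Spec_win2; infer_instance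

-- ===== CLAIM (what is proved, stated in full; the proofs are below) =====
def Claim_equal_win2 : Prop := ∀ (lst : List Int), Dom_win2 lst → Spec_win2 lst (win2 lst)

-- ===== LEMMAS AND PROOFS =====

theorem win2Loop1_eq_any (lst : List Int) (idxs : List Int) :
    win2Loop1 lst idxs = idxs.any (fun i => decide (3 ≤ PySem.List.pyGetD lst i 0)) := by
  induction idxs with
  | nil => rfl
  | cons i rest ih => simp only [win2Loop1, List.any_cons, ih]; split_ifs with h <;> simp [h]

theorem win2Loop2_eq_any (lst : List Int) (idxs : List Int) :
    win2Loop2 lst idxs = idxs.any (fun i =>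
      decide (1 ≤ PySem.List.pyGetD lst i 0 ∧ 1 ≤ PySem.List.pyGetD lst (i + 1) 0 ∧
        1 ≤ PySem.List.pyGetD lst (i + 2) 0)) := by
  induction idxs with
  | nil => rfl
  | cons i rest ih => simp only [win2Loop2, List.any_cons, ih]; split_ifs with h <;> simp [h]

-- the "three consecutive elements ≥ 1" condition, over Nat indices
def TripleAt (lst : List Int) : Prop :=
  ∃ i : Nat, i + 2 < lst.length ∧ 1 ≤ lst.getD i 0 ∧ 1 ≤ lst.getD (i + 1) 0 ∧
    1 ≤ lst.getD (i + 2) 0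

theorem loop1_iff (lst : List Int) :
    win2Loop1 lst (PySem.List.pyRange 0 (lst.length : Int) 1) = true ↔ ∃ x ∈ lst, 3 ≤ x := by
  rw [win2Loop1_eq_any, List.any_eq_true]
  constructor
  · rintro ⟨i, hi, h3⟩
    rw [PySem.List.mem_pyRange_one] at hi
    simp only [decide_eq_true_eq] at h3
    exact ⟨PySem.List.pyGetD lst i 0, PySem.List.pyGetD_mem lst 0 ⟨by omega, by omega⟩, h3⟩
  · rintro ⟨x, hx, h3⟩
    obtain ⟨n, hn, rfl⟩ := List.mem_iff_getElem.mp hx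
    refine ⟨(n : Int), ?_, ?_⟩
    · rw [PySem.List.mem_pyRange_one]; omega
    · simp only [PySem.List.pyGetD_natCast, decide_eq_true_eq]
      rwa [List.getD_eq_getElem lst 0 hn]

theorem loop2_iff (lst : List Int) :
    win2Loop2 lst (PySem.List.pyRange 0 ((lst.length : Int) - 2) 1) = true ↔ TripleAt lst := by
  rw [win2Loop2_eq_any, List.any_eq_true]
  constructor
  · rintro ⟨i, hi, h⟩
    rw [PySem.List.mem_pyRange_one] at hi
    simp only [decide_eq_true_eq] at h
    obtain ⟨h0, h1, h2⟩ := h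
    refine ⟨i.toNat, by omega, ?_, ?_, ?_⟩
    · rw [show i = ((i.toNat : Nat) : Int) by omega, PySem.List.pyGetD_natCast] at h0; exact h0
    · rw [show i + 1 = ((i.toNat + 1 : Nat) : Int) by omega, PySem.List.pyGetD_natCast] at h1
      exact h1
    · rw [show i + 2 = ((i.toNat + 2 : Nat) : Int) by omega, PySem.List.pyGetD_natCast] at h2
      exact h2
  · rintro ⟨n, hn, h0, h1, h2⟩
    refine ⟨(n : Int), ?_, ?_⟩
    · rw [PySem.List.mem_pyRange_one]; omega
    · simp only [decide_eq_true_eq]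
      refine ⟨?_, ?_, ?_⟩
      · rw [PySem.List.pyGetD_natCast]; exact h0
      · rw [show (n : Int) + 1 = ((n + 1 : Nat) : Int) by omega, PySem.List.pyGetD_natCast]
        exact h1
      · rw [show (n : Int) + 2 = ((n + 2 : Nat) : Int) by omega, PySem.List.pyGetD_natCast]
        exact h2

-- B's boolean triple-run test (the run counter with the ≥ 3 check stripped out)
def tfB : List Int → Nat → Bool
  | [], _ => false
  | x :: xs, run =>
    if 1 ≤ x then (if run + 1 = 3 then true else tfB xs (run + 1)) else tfB xs 0

theorem win2Go_eq (xs : List Int) (r : Nat) :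
    win2Go xs (r : Int) = if (xs.any (fun x => decide (3 ≤ x)) || tfB xs r) then 2 else 0 := by
  induction xs generalizing r with
  | nil => simp [win2Go, tfB]
  | cons x xs ih =>
    simp only [win2Go, tfB, List.any_cons]
    by_cases h3 : 3 ≤ x
    · simp [h3]
    · by_cases h1 : 1 ≤ x
      · by_cases hr : r + 1 = 3
        · have hri : (r : Int) + 1 = 3 := by omega
          simp [h3, h1, hr, hri]
        · have hri : ¬((r : Int) + 1 = 3) := by omega
          rw [if_neg h3, if_pos h1, if_neg hri,
            show (r : Int) + 1 = ((r + 1 : Nat) : Int) by omega, ih]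
          simp [h3, h1, hr]
      · rw [if_neg h3, if_neg h1, show (0 : Int) = ((0 : Nat) : Int) from rfl, ih]
        simp [h3, h1]

theorem getD_pad (r : Nat) (x : Int) (xs : List Int) (k : Nat) :
    (List.replicate r (1 : Int) ++ x :: xs).getD k 0 =
      if k < r then 1 else if k = r then x else xs.getD (k - r - 1) 0 := by
  by_cases h1 : k < r
  · rw [if_pos h1, List.getD_append _ _ _ _ (by simpa using h1), List.getD_replicate _ h1]
  · rw [if_neg h1, List.getD_append_right _ _ _ _ (by simp; omega), List.length_replicate]
    by_cases h2 : k = r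
    · rw [if_pos h2, h2]; simp
    · rw [if_neg h2, show k - r = (k - r - 1) + 1 by omega]
      simp

theorem tripleAt_pad_mono (r : Nat) (x y : Int) (xs : List Int) (hy : 1 ≤ y) :
    TripleAt (List.replicate r 1 ++ x :: xs) → TripleAt (List.replicate r 1 ++ y :: xs) := by
  rintro ⟨i, hl, h0, ha, hb⟩
  rw [getD_pad] at h0 ha hb
  refine ⟨i, by simp_all, ?_, ?_, ?_⟩ <;> rw [getD_pad]
  · split_ifs at h0 ⊢ <;> assumption
  · split_ifs at ha ⊢ <;> assumption
  · split_ifs at hb ⊢ <;> assumption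

theorem tfB_iff (xs : List Int) : ∀ r : Nat, r ≤ 2 →
    (tfB xs r = true ↔ TripleAt (List.replicate r 1 ++ xs)) := by
  induction xs with
  | nil =>
    intro r hr
    simp only [tfB, List.append_nil, Bool.false_eq_true, false_iff]
    rintro ⟨i, hl, -⟩
    simp only [List.length_replicate] at hl
    omega
  | cons x xs ih =>
    intro r hr
    by_cases h1 : 1 ≤ x
    · by_cases hr3 : r + 1 = 3
      · have hr2 : r = 2 := by omega
        subst hr2
        rw [show tfB (x :: xs) 2 = true by simp [tfB, h1]]
        refine iff_of_true rfl ⟨0, by simp, ?_, ?_, ?_⟩ <;> rw [getD_pad] <;> norm_num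
        exact h1
      · rw [show tfB (x :: xs) r = tfB xs (r + 1) by simp [tfB, h1, hr3],
          ih (r + 1) (by omega),
          show List.replicate (r + 1) (1 : Int) ++ xs = List.replicate r 1 ++ (1 : Int) :: xs by
            rw [List.replicate_succ']; simp]
        exact ⟨tripleAt_pad_mono r 1 x xs h1, tripleAt_pad_mono r x 1 xs le_rfl⟩
    · rw [show tfB (x :: xs) r = tfB xs 0 by simp [tfB, h1], ih 0 (by omega)]
      simp only [List.replicate_zero, List.nil_append]
      constructor
      · rintro ⟨j, hl, h0, ha, hb⟩
        refine ⟨j + r + 1, by simp; omega, ?_, ?_, ?_⟩ <;> rw [getD_pad]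
        · rw [if_neg (by omega), if_neg (by omega), show j + r + 1 - r - 1 = j by omega]
          exact h0
        · rw [if_neg (by omega), if_neg (by omega), show j + r + 1 + 1 - r - 1 = j + 1 by omega]
          exact ha
        · rw [if_neg (by omega), if_neg (by omega), show j + r + 1 + 2 - r - 1 = j + 2 by omega]
          exact hb
      · rintro ⟨i, hl, h0, ha, hb⟩
        rw [getD_pad] at h0 ha hb
        have hir : r < i := by
          rcases Nat.lt_or_ge r i with h | h
          · exact h
          · exfalso; split_ifs at h0 ha hb <;> omega
        refine ⟨i - r - 1, ?_, ?_, ?_, ?_⟩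
        · simp only [List.length_append, List.length_replicate, List.length_cons] at hl; omega
        · rw [if_neg (by omega), if_neg (by omega)] at h0; exact h0
        · rw [if_neg (by omega), if_neg (by omega),
            show i + 1 - r - 1 = (i - r - 1) + 1 by omega] at ha
          exact ha
        · rw [if_neg (by omega), if_neg (by omega),
            show i + 2 - r - 1 = (i - r - 1) + 2 by omega] at hb
          exact hb

-- ===== VERDICT (by name: the statement is the Claim_ definition above) =====
theorem win2_spec : Claim_equal_win2 := by
  intro lst _
  unfold Spec_win2 win2 win2_alt
  have hb := win2Go_eq lst 0
  rw [Nat.cast_zero] at hb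
  have h1 : win2Loop1 lst (PySem.List.pyRange 0 (lst.length : Int) 1) =
      lst.any (fun x => decide (3 ≤ x)) := by
    rw [Bool.eq_iff_iff, loop1_iff, List.any_eq_true]; simp
  have h2 : win2Loop2 lst (PySem.List.pyRange 0 ((lst.length : Int) - 2) 1) = tfB lst 0 := by
    rw [Bool.eq_iff_iff, loop2_iff, tfB_iff lst 0 (by norm_num)]; simp
  rw [h1, h2, hb]
  cases lst.any (fun x => decide (3 ≤ x)) <;> cases tfB lst 0 <;> simp
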